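-- pv_equiv track=rewrite | github.com/hyeonpark-5/Programmars_study | LV1/a2.py | solution
-- ===== SOURCE A (Python) =====
-- from collections import deque
-- import copy
--
-- def solution(s):
--     s = deque(s)
--     answer = 0
--     while len(s) > 0:
--         count = 1
--         if len(s) == 1:
--             answer += 1
--         x = s.popleft()
--
--         for word in copy.deepcopy(s):
--             if x == word:
--                 count += 1
--             else:
--                 count -= 1
--
--             s.popleft()
--             if count == 0 or (len(s) == 0 and count >= 1):
--                 answer += 1
--                 break
--
--     return answer
-- ===== SOURCE B (Python) =====
-- def solution(s):
--     answer = 0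
--     pivot = None
--     bal = 0
--     for c in s:
--         if bal == 0:
--             pivot = c
--             bal = 1
--             answer += 1
--         else:
--             bal += 1 if c == pivot else -1
--     return answer
-- ===== Notes on version B (the rewrite author's own statement) =====
-- stated objective: faster
-- what changed: Replaced A's nested loops (deque with a per-iteration deepcopy scanned by an inner for) with a single flat fold over the characters that carries (answer, balance, pivot) as state, counting a group when the balance is zero.
import Mathlib
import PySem

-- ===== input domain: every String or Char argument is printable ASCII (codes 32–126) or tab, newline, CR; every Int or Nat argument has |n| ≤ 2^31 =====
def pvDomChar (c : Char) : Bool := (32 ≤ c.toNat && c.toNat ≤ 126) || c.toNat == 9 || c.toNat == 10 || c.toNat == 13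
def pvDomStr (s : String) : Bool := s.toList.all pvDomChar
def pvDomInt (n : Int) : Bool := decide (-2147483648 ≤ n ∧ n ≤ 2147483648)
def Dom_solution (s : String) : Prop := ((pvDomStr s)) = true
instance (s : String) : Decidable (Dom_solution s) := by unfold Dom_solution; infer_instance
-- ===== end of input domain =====

-- B replaces A's nested loops (deque + per-iteration deepcopy) with one flat fold over
-- the characters carrying (answer, balance, pivot) state (objective: faster).

-- ===== PORT A =====
-- A's inner for-loop: iterates over a deepcopy of the remaining deque (`copyL`) while
-- popping from the live deque (`s`) in lockstep; returns (answer, remaining deque).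
def solInnerA (x : Char) : List Char → List Char → Int → Int → Int × List Char
  | [], s, _, answer => (answer, s)
  | word :: rest, s, count, answer =>
    let count' := if x == word then count + 1 else count - 1
    let s' := s.tail
    if count' == 0 || (s'.length == 0 && decide (count' ≥ 1)) then (answer + 1, s')
    else solInnerA x rest s' count' answer

-- (termination helper for the outer while-loop below)
theorem solInnerA_len (x : Char) : ∀ (copyL s : List Char) (c a : Int),
    (solInnerA x copyL s c a).2.length ≤ s.length := by
  intro copyL
  induction copyL with
  | nil => intro s c a; simp [solInnerA]
  | cons w rest ih =>
    intro s c a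
    have ht : s.tail.length ≤ s.length := by cases s <;> simp
    cases hx : (x == w) <;>
      simp only [solInnerA, hx, Bool.false_eq_true, if_true, if_false] <;> split <;>
      first
        | exact ht
        | exact le_trans (ih _ _ _) ht

-- A's outer while-loop over the deque.
def solOuterA : List Char → Int → Int
  | [], answer => answer
  | x :: rest, answer =>
    let answer1 := if (x :: rest).length == 1 then answer + 1 else answer
    let r := solInnerA x rest rest 1 answer1
    solOuterA r.2 r.1
termination_by s _ => s.length
decreasing_by
  exact Nat.lt_succ_of_le (solInnerA_len x rest rest 1 answer1)

def solution (s : String) : Int := solOuterA s.toList 0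

-- ===== PORT B =====
-- B's single pass: one fold step per character on the state (answer, bal, pivot);
-- pivot is Python's `pivot` variable (None before the first character).
def solStepB (st : Int × Int × Option Char) (c : Char) : Int × Int × Option Char :=
  if st.2.1 == 0 then (st.1 + 1, 1, some c)
  else (st.1, st.2.1 + (if some c == st.2.2 then 1 else -1), st.2.2)

def solution_alt (s : String) : Int := (s.toList.foldl solStepB (0, 0, none)).1

-- ===== PRECONDITION & SPEC =====
def Spec_solution (s : String) (out : Int) : Prop := out = solution_alt s
instance (s : String) (out : Int) : Decidable (Spec_solution s out) := by unfold Spec_solution; infer_instance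

-- ===== CLAIM (what is proved, stated in full; the proofs are below) =====
def Claim_equal_solution : Prop := ∀ (s : String), Dom_solution s → Spec_solution s (solution s)

-- ===== LEMMAS AND PROOFS =====

-- Proof-only helper: the suffix left after one group closes, scanning with balance c.
def groupRest (x : Char) : List Char → Int → List Char
  | [], _ => []
  | c :: rest, count =>
    let count' := count + (if c == x then 1 else -1)
    if count' == 0 then rest else groupRest x rest count'

theorem groupRest_len (x : Char) : ∀ (l : List Char) (c : Int),
    (groupRest x l c).length ≤ l.length := by
  intro l
  induction l with
  | nil => intro c; simp [groupRest]
  | cons w rest ih =>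
    intro c
    cases hx : (w == x) <;>
      simp only [groupRest, hx, Bool.false_eq_true, if_true, if_false] <;> split <;>
      first
        | exact Nat.le_succ _
        | exact le_trans (ih _) (Nat.le_succ _)

-- Proof-only helper: A's outer loop rephrased as one group per iteration.
def groupsA : List Char → Int → Int
  | [], answer => answer
  | x :: rest, answer => groupsA (groupRest x rest 1) (answer + 1)
termination_by s _ => s.length
decreasing_by
  exact Nat.lt_succ_of_le (groupRest_len x rest 1)

theorem stepA (x w : Char) (rest s : List Char) (c a : Int) :
    solInnerA x (w :: rest) s c a =
      (if ((if x == w then c + 1 else c - 1) == 0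
            || (s.tail.length == 0 && decide ((if x == w then c + 1 else c - 1) ≥ 1)))
       then (a + 1, s.tail)
       else solInnerA x rest s.tail (if x == w then c + 1 else c - 1) a) := rfl

theorem stepR (x w : Char) (rest : List Char) (c : Int) :
    groupRest x (w :: rest) c =
      (if (c + (if w == x then 1 else -1) == 0) then rest
       else groupRest x rest (c + (if w == x then 1 else -1))) := rfl

-- In A's inner loop the deepcopy and the live deque start equal, and with count ≥ 1 the
-- loop always breaks before exhausting a nonempty copy, so it returns answer + 1 and the
-- suffix groupRest.
theorem inner_eq (x : Char) : ∀ (l : List Char) (c a : Int), l ≠ [] → 1 ≤ c →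
    solInnerA x l l c a = (a + 1, groupRest x l c) := by
  intro l
  induction l with
  | nil => intro c a h _; exact absurd rfl h
  | cons w rest ih =>
    intro c a _ hc
    rw [stepA, stepR]
    by_cases h : x = w
    · have hx : (x == w) = true := by simp [h]
      have hwx : (w == x) = true := by simp [h]
      have hge : (1 : Int) ≤ c + 1 := by omega
      cases rest with
      | nil => simp [hx, hwx, hge, groupRest]
      | cons r rs =>
        simp only [hx, hwx, if_true, List.tail_cons, List.length_cons]
        rw [if_neg (by simp; omega), if_neg (by simp; omega)]
        exact ih (c + 1) a (by simp) hge
    · have hx : (x == w) = false := by simp [h]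
      have hwx : (w == x) = false := by rw [beq_eq_false_iff_ne]; exact fun e => h e.symm
      have he : c + (-1 : Int) = c - 1 := by ring
      by_cases hz : c - 1 = 0
      · cases rest with
        | nil => simp [hx, hwx, he, hz]
        | cons r rs => simp [hx, hwx, he, hz]
      · have hge : (1 : Int) ≤ c - 1 := by omega
        cases rest with
        | nil => simp [hx, hwx, he, hz, hge, groupRest]
        | cons r rs =>
          simp only [hx, hwx, he, Bool.false_eq_true, if_false, List.tail_cons,
            List.length_cons]
          rw [if_neg (by simp; omega), if_neg (by simp; omega)]
          exact ih (c - 1) a (by simp) hge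

-- A's outer loop adds 1 per group (len==1 branch on singletons, inner break otherwise).
theorem outerA_eq_groups : ∀ (n : ℕ) (l : List Char), l.length ≤ n → ∀ (a : Int),
    solOuterA l a = groupsA l a := by
  intro n
  induction n with
  | zero =>
    intro l hl a
    have h : l = [] := List.eq_nil_of_length_eq_zero (Nat.le_zero.mp hl)
    subst h; simp [solOuterA, groupsA]
  | succ n ih =>
    intro l hl a
    cases l with
    | nil => simp [solOuterA, groupsA]
    | cons x rest =>
      cases rest with
      | nil => simp [solOuterA, solInnerA, groupsA, groupRest]
      | cons r rs =>
        rw [solOuterA, groupsA]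
        simp only [List.length_cons, show ((rs.length + 1 + 1 : ℕ) == 1) = false by simp]
        rw [if_neg (by simp)]
        rw [inner_eq x (r :: rs) 1 a (by simp) (le_refl 1)]
        exact ih _ (le_trans (groupRest_len x (r :: rs) 1)
          (by simpa using Nat.le_of_succ_le_succ hl)) _

-- While the balance is ≥ 1 with pivot x, the fold tracks groupRest: once the group
-- closes the fold continues from (a, 0, some x); if it never closes the answer is a too.
theorem fold_group (x : Char) : ∀ (l : List Char) (c a : Int), 1 ≤ c →
    (l.foldl solStepB (a, c, some x)).1 =
      ((groupRest x l c).foldl solStepB (a, 0, some x)).1 := by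
  intro l
  induction l with
  | nil => intro c a _; simp [groupRest]
  | cons w rest ih =>
    intro c a hc
    have hstep : solStepB (a, c, some x) w = (a, c + (if w == x then 1 else -1), some x) := by
      simp only [solStepB]
      rw [if_neg (by simp; omega)]
      simp
    rw [List.foldl_cons, hstep, stepR]
    cases hx : (w == x) with
    | true =>
      simp only [if_true]
      rw [if_neg (by simp; omega)]
      exact ih (c + 1) a (by omega)
    | false =>
      simp only [Bool.false_eq_true, if_false]
      by_cases hz : c + (-1 : Int) = 0
      · rw [if_pos (by simpa using hz), hz]
      · rw [if_neg (by simpa using hz)]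
        exact ih (c + (-1)) a (by omega)

-- The fold with balance 0 equals the one-group-per-iteration recursion.
theorem fold_eq_groups : ∀ (n : ℕ) (l : List Char), l.length ≤ n →
    ∀ (a : Int) (p : Option Char), (l.foldl solStepB (a, 0, p)).1 = groupsA l a := by
  intro n
  induction n with
  | zero =>
    intro l hl a p
    have h : l = [] := List.eq_nil_of_length_eq_zero (Nat.le_zero.mp hl)
    subst h; simp [groupsA]
  | succ n ih =>
    intro l hl a p
    cases l with
    | nil => simp [groupsA]
    | cons x rest =>
      rw [List.foldl_cons, show solStepB (a, 0, p) x = (a + 1, 1, some x) from rfl,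
        fold_group x rest 1 (a + 1) (le_refl 1), groupsA]
      exact ih _ (le_trans (groupRest_len x rest 1)
        (by simpa using Nat.le_of_succ_le_succ hl)) _ _

-- ===== VERDICT (by name: the statement is the Claim_ definition above) =====
theorem solution_spec : Claim_equal_solution := by
  intro s _
  unfold Spec_solution solution solution_alt
  rw [fold_eq_groups s.toList.length s.toList (le_refl _) 0 none]
  exact outerA_eq_groups s.toList.length s.toList (le_refl _) 0
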